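-- pv_equiv track=rewrite | github.com/WAKU-TAKE-A/md-pptx-injector | md-pptx-injector.py | remove_first_exact_line
-- ===== SOURCE A (Python) =====
-- def remove_first_exact_line(lines: list[str], target: str | None) -> list[str]:
--     """Remove first occurrence of exact line match."""
--     if not target:
--         return lines
--     out = []
--     removed = False
--     for ln in lines:
--         if not removed and ln.strip() == target:
--             removed = True
--             continue
--         out.append(ln)
--     return out
-- ===== SOURCE B (Python) =====
-- def remove_first_exact_line(lines: list[str], target: str | None) -> list[str]:
--     """Remove first occurrence of exact line match (locate-then-splice)."""
--     if not target:
--         return lines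
--     for i, ln in enumerate(lines):
--         if ln.strip() == target:
--             return lines[:i] + lines[i + 1:]
--     return list(lines)
-- ===== Notes on version B (the rewrite author's own statement) =====
-- stated objective: simpler
-- what changed: Replaced the accumulator-plus-removed-flag filter loop by a locate-then-splice scan: find the index of the first stripped match with enumerate and return lines[:i] + lines[i+1:], copying the list when no line matches.
import Mathlib
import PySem

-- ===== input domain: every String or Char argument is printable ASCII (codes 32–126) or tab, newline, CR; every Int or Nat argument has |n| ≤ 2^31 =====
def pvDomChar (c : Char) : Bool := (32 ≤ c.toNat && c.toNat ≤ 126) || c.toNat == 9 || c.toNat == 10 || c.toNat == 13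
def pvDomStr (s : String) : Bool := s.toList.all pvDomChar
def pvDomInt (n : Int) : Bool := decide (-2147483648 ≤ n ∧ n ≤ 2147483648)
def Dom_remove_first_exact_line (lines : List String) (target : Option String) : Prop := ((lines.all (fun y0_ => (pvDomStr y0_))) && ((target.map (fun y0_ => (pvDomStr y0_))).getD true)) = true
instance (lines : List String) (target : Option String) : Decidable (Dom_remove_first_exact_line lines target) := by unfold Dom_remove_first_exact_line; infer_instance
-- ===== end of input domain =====

-- B replaces A's accumulator-with-removed-flag filter loop by a locate-then-splice scan (simpler decomposition; return value proved equal).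

-- ===== PORT A =====
-- A's for-loop: carries the `removed` flag and appends to `out`.
def pvALoop (t : String) : List String → Bool → List String
  | [], _ => []
  | ln :: rest, removed =>
    if !removed && PySem.Str.strip ln == t then pvALoop t rest true
    else ln :: pvALoop t rest removed

def remove_first_exact_line (lines : List String) (target : Option String) : List String :=
  match target with
  | none => lines
  | some t => if t = "" then lines else pvALoop t lines false

-- ===== PORT B =====
-- Source B's enumerate scan: index of the first stripped match, if any.
def pvFindIdx (t : String) : List String → Option Nat
  | [] => none
  | ln :: rest =>
    if PySem.Str.strip ln == t then some 0
    else (pvFindIdx t rest).map (· + 1)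

def remove_first_exact_line_alt (lines : List String) (target : Option String) : List String :=
  match target with
  | none => lines
  | some t =>
    if t = "" then lines
    else
      match pvFindIdx t lines with
      | some i => lines.take i ++ lines.drop (i + 1)   -- lines[:i] + lines[i+1:]
      | none => lines                                   -- list(lines): fresh copy, same value

-- ===== PRECONDITION & SPEC =====
def Spec_remove_first_exact_line (lines : List String) (target : Option String) (out : List String) : Prop := out = remove_first_exact_line_alt lines target
instance (lines : List String) (target : Option String) (out : List String) : Decidable (Spec_remove_first_exact_line lines target out) := by unfold Spec_remove_first_exact_line; infer_instance

-- ===== CLAIM (what is proved, stated in full; the proofs are below) =====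
def Claim_equal_remove_first_exact_line : Prop := ∀ (lines : List String) (target : Option String), Dom_remove_first_exact_line lines target → Spec_remove_first_exact_line lines target (remove_first_exact_line lines target)

-- ===== LEMMAS AND PROOFS =====
theorem pvALoop_true (t : String) (ls : List String) : pvALoop t ls true = ls := by
  induction ls with
  | nil => rfl
  | cons ln rest ih => simp [pvALoop, ih]

theorem pvALoop_eq_splice (t : String) (ls : List String) :
    pvALoop t ls false =
      (match pvFindIdx t ls with
       | some i => ls.take i ++ ls.drop (i + 1)
       | none => ls) := by
  induction ls with
  | nil => rfl
  | cons ln rest ih =>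
    by_cases h : PySem.Str.strip ln == t
    · simp [pvALoop, pvFindIdx, h, pvALoop_true]
    · simp only [pvALoop, pvFindIdx, h, Bool.false_eq_true, if_false, Bool.not_false,
        Bool.true_and, ih]
      cases hf : pvFindIdx t rest with
      | none => simp
      | some i => simp [List.take_succ_cons, List.drop_succ_cons]

-- ===== VERDICT (by name: the statement is the Claim_ definition above) =====
theorem remove_first_exact_line_spec : Claim_equal_remove_first_exact_line := by
  intro lines target _
  unfold Spec_remove_first_exact_line remove_first_exact_line remove_first_exact_line_alt
  cases target with
  | none => rfl
  | some t =>
    by_cases ht : t = ""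
    · simp [ht]
    · simp [ht, pvALoop_eq_splice]
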